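-- pv_equiv track=rewrite | github.com/guntas-13/aoc2025 | d10_p1.py | bfs
-- ===== SOURCE A (Python) =====
-- from collections import deque
--
-- def bfs(button_masks: list, pattern: int) -> int:
--     q = deque([(btn_mask, 1) for btn_mask in button_masks])
--     visited = set()
--     while q:
--         bmask, depth = q.popleft()
--         if bmask == pattern:
--             return depth
--         for next_bmask in button_masks:
--             node = next_bmask ^ bmask
--             if node not in visited:
--                 visited.add(node)
--                 q.append((node, depth + 1))
--     return -1
-- ===== SOURCE B (Python) =====
-- def bfs(button_masks: list, pattern: int) -> int:
--     frontier = set(button_masks)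
--     visited = set()
--     depth = 1
--     while frontier:
--         if pattern in frontier:
--             return depth
--         nxt = {m ^ b for m in frontier for b in button_masks if (m ^ b) not in visited}
--         visited |= nxt
--         frontier = nxt
--         depth += 1
--     return -1
-- ===== Notes on version B (the rewrite author's own statement) =====
-- stated objective: alternative
-- what changed: Replaces the node-by-node deque BFS carrying (mask, depth) tuples and a per-node visited check with a level-synchronous BFS: one frontier set per layer, the next frontier computed by a single set comprehension over the current layer, and depth kept as a layer counter instead of being stored with every queue entry.
import Mathlib
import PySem

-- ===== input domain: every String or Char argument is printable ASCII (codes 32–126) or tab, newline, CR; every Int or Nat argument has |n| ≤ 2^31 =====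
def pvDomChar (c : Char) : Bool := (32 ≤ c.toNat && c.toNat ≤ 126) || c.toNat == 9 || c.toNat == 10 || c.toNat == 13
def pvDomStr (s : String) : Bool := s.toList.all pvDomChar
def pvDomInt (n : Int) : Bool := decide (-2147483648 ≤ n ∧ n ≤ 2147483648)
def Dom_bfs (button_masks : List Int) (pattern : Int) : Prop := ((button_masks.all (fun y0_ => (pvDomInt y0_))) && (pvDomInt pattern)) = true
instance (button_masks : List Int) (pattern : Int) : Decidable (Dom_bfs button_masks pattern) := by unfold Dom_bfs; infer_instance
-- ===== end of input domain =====

-- B replaces A's node-by-node deque BFS (per-node depth tags) by a level-synchronous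
-- frontier-set BFS (one set per layer, depth = layer counter); same return value, proved below.


-- ===== PORT A =====
-- A's while-loop over the deque, one pop per recursive call; fuel only makes the
-- recursion total — button_masks.length + 2^34 + 2 is proved sufficient on Dom below
-- (every reachable node is an XOR of masks with |mask| ≤ 2^31 and so lies in [-2^32, 2^32)).
def bfsLoopA (button_masks : List Int) (pattern : Int) :
    Nat → List (Int × Int) → PySem.Set Int → Option Int
  | 0, _, _ => none
  | fuel + 1, q, visited =>
    match q with
    | [] => some (-1)
    | (bmask, depth) :: q' =>
      if bmask = pattern then some depth
      else
        let st := button_masks.foldl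
          (fun (st : List (Int × Int) × PySem.Set Int) next_bmask =>
            let node := PySem.Int.bxor next_bmask bmask
            if PySem.Set.contains st.2 node then st
            else (st.1 ++ [(node, depth + 1)], PySem.Set.add st.2 node))
          (q', visited)
        bfsLoopA button_masks pattern fuel st.1 st.2

def bfs (button_masks : List Int) (pattern : Int) : Int :=
  (bfsLoopA button_masks pattern (button_masks.length + 2 ^ 34 + 2)
    (button_masks.map (fun btn_mask => (btn_mask, (1 : Int)))) PySem.Set.empty).getD (-1)

-- ===== PORT B =====
-- B's while-loop over whole BFS layers; fuel 2^33 + 2 (number of layers is at most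
-- |[-2^32, 2^32)| + 2 on Dom) only makes the recursion total, proved sufficient below.
def bfsLoopB (button_masks : List Int) (pattern : Int) :
    Nat → PySem.Set Int → PySem.Set Int → Int → Option Int
  | 0, _, _, _ => none
  | fuel + 1, frontier, visited, depth =>
    if frontier = [] then some (-1)
    else if pattern ∈ frontier then some depth
    else
      let nxt := PySem.Set.ofList
        ((frontier.flatMap (fun m => button_masks.map (fun b => PySem.Int.bxor m b))).filter
          (fun v => !PySem.Set.contains visited v))
      bfsLoopB button_masks pattern fuel nxt (PySem.Set.union visited nxt) (depth + 1)

def bfs_alt (button_masks : List Int) (pattern : Int) : Int :=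
  (bfsLoopB button_masks pattern (2 ^ 33 + 2)
    (PySem.Set.ofList button_masks) PySem.Set.empty 1).getD (-1)

-- ===== PRECONDITION & SPEC =====
def Spec_bfs (button_masks : List Int) (pattern : Int) (out : Int) : Prop := out = bfs_alt button_masks pattern
instance (button_masks : List Int) (pattern : Int) (out : Int) : Decidable (Spec_bfs button_masks pattern out) := by unfold Spec_bfs; infer_instance

-- ===== CLAIM (what is proved, stated in full; the proofs are below) =====
def Claim_equal_bfs : Prop := ∀ (button_masks : List Int) (pattern : Int), Dom_bfs button_masks pattern → Spec_bfs button_masks pattern (bfs button_masks pattern)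

-- ===== LEMMAS AND PROOFS =====

-- All values ever reached by either program lie in this finite interval (on Dom inputs).
def pvS : Finset Int := (Finset.range (2 ^ 33)).image (fun n : Nat => (n : Int) - 2 ^ 32)

theorem mem_pvS {a : Int} : a ∈ pvS ↔ -(2 ^ 32) ≤ a ∧ a < 2 ^ 32 := by
  simp only [pvS, Finset.mem_image, Finset.mem_range]
  constructor
  · rintro ⟨n, hn, rfl⟩; omega
  · intro h
    exact ⟨(a + 2 ^ 32).toNat, by omega, by omega⟩

theorem pvS_card : pvS.card = 2 ^ 33 := by
  unfold pvS
  rw [Finset.card_image_of_injective _ (by intro a b h; simp only [sub_left_inj, Nat.cast_inj] at h; exact h)]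
  simp

theorem bxor_mem_pvS {a b : Int} (ha : a ∈ pvS) (hb : b ∈ pvS) : PySem.Int.bxor a b ∈ pvS := by
  rw [mem_pvS] at ha hb ⊢
  unfold PySem.Int.bxor
  split_ifs with h1 h2 h3 <;>
  · first
    | (have hx := Nat.xor_lt_two_pow (x := a.toNat) (y := b.toNat) (n := 32) (by omega) (by omega); omega)
    | (have hx := Nat.xor_lt_two_pow (x := a.toNat) (y := (-b - 1).toNat) (n := 32) (by omega) (by omega); omega)
    | (have hx := Nat.xor_lt_two_pow (x := (-a - 1).toNat) (y := b.toNat) (n := 32) (by omega) (by omega); omega)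
    | (have hx := Nat.xor_lt_two_pow (x := (-a - 1).toNat) (y := (-b - 1).toNat) (n := 32) (by omega) (by omega); omega)

theorem dom_mem_pvS {a : Int} (h : pvDomInt a = true) : a ∈ pvS := by
  simp [pvDomInt] at h
  rw [mem_pvS]
  omega

-- value-level form of A's inner "for next_bmask in button_masks" loop:
-- C accumulates the newly discovered nodes, the Set is the visited set.
def pvGo (xs : List Int) (p : List Int × PySem.Set Int) : List Int × PySem.Set Int :=
  xs.foldl (fun p v => if PySem.Set.contains p.2 v then p else (p.1 ++ [v], PySem.Set.add p.2 v)) p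

-- one whole BFS layer of A, at the value level
def pvLevel (bm : List Int) (F : List Int) (p : List Int × PySem.Set Int) : List Int × PySem.Set Int :=
  F.foldl (fun p x => pvGo (bm.map (fun nb => PySem.Int.bxor nb x)) p) p

theorem pvGo_split (xs : List Int) : ∀ (C V₀ : List Int),
    pvGo xs (C, V₀ ++ C)
      = (PySem.Set.update C (xs.filter (fun v => !PySem.Set.contains V₀ v)),
         V₀ ++ PySem.Set.update C (xs.filter (fun v => !PySem.Set.contains V₀ v))) := by
  induction xs with
  | nil => intro C V₀; simp [pvGo, PySem.Set.update_nil]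
  | cons v xs ih =>
    intro C V₀
    by_cases hv : v ∈ V₀
    · have hcap : PySem.Set.contains (V₀ ++ C) v = true := by
        rw [PySem.Set.contains_iff]; exact List.mem_append_left _ hv
      have hfv : (!PySem.Set.contains V₀ v) = false := by
        rw [Bool.not_eq_false', PySem.Set.contains_iff]; exact hv
      simp only [pvGo, List.foldl_cons, hcap, if_true, List.filter_cons, hfv]
      exact ih C V₀
    · by_cases hc : v ∈ C
      · have hcap : PySem.Set.contains (V₀ ++ C) v = true := by
          rw [PySem.Set.contains_iff]; exact List.mem_append_right _ hc
        have hfv : (!PySem.Set.contains V₀ v) = true := by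
          rw [Bool.not_eq_true', ← Bool.not_eq_true, PySem.Set.contains_iff]; exact hv
        simp only [pvGo, List.foldl_cons, hcap, if_true, List.filter_cons, hfv]
        rw [PySem.Set.update_cons, PySem.Set.add_of_mem hc]
        exact ih C V₀
      · have hcap : PySem.Set.contains (V₀ ++ C) v = false := by
          rw [← Bool.not_eq_true, PySem.Set.contains_iff]
          simp only [List.mem_append]; tauto
        have hfv : (!PySem.Set.contains V₀ v) = true := by
          rw [Bool.not_eq_true', ← Bool.not_eq_true, PySem.Set.contains_iff]; exact hv
        simp only [pvGo, List.foldl_cons, hcap, Bool.false_eq_true, if_false, List.filter_cons, hfv]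
        have hadd : PySem.Set.add (V₀ ++ C) v = V₀ ++ (C ++ [v]) := by
          rw [PySem.Set.add_of_not_mem (by simp only [List.mem_append]; tauto), List.append_assoc]
        rw [hadd]
        have := ih (C ++ [v]) V₀
        simp only [pvGo] at this
        rw [this]
        simp only [if_true]
        rw [PySem.Set.update_cons, PySem.Set.add_of_not_mem hc]

theorem pvLevel_split (bm : List Int) : ∀ (F : List Int) (C V₀ : List Int),
    pvLevel bm F (C, V₀ ++ C)
      = (PySem.Set.update C
           ((F.flatMap (fun x => bm.map (fun nb => PySem.Int.bxor nb x))).filter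
             (fun v => !PySem.Set.contains V₀ v)),
         V₀ ++ PySem.Set.update C
           ((F.flatMap (fun x => bm.map (fun nb => PySem.Int.bxor nb x))).filter
             (fun v => !PySem.Set.contains V₀ v))) := by
  intro F
  induction F with
  | nil => intro C V₀; simp [pvLevel, PySem.Set.update_nil]
  | cons x F ih =>
    intro C V₀
    have hstep : pvLevel bm (x :: F) (C, V₀ ++ C)
        = pvLevel bm F (pvGo (bm.map (fun nb => PySem.Int.bxor nb x)) (C, V₀ ++ C)) := rfl
    rw [hstep, pvGo_split, ih, List.flatMap_cons, List.filter_append, PySem.Set.update_append]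

-- A's inner foldl, with the queue split off
theorem foldA_split (bm : List Int) (x d : Int) (Q : List (Int × Int)) (N : List Int) (V : PySem.Set Int) :
    bm.foldl
      (fun (st : List (Int × Int) × PySem.Set Int) nb =>
        let node := PySem.Int.bxor nb x
        if PySem.Set.contains st.2 node then st
        else (st.1 ++ [(node, d + 1)], PySem.Set.add st.2 node))
      (Q ++ N.map (fun v => (v, d + 1)), V)
      = (Q ++ (pvGo (bm.map (fun nb => PySem.Int.bxor nb x)) (N, V)).1.map (fun v => (v, d + 1)),
         (pvGo (bm.map (fun nb => PySem.Int.bxor nb x)) (N, V)).2) := by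
  rw [show (fun (st : List (Int × Int) × PySem.Set Int) nb =>
        let node := PySem.Int.bxor nb x
        if PySem.Set.contains st.2 node then st
        else (st.1 ++ [(node, d + 1)], PySem.Set.add st.2 node))
      = (fun (st : List (Int × Int) × PySem.Set Int) nb =>
          (fun st v => if PySem.Set.contains st.2 v then st
            else (st.1 ++ [(v, d + 1)], PySem.Set.add st.2 v)) st (PySem.Int.bxor nb x)) from rfl,
    ← List.foldl_map (f := fun nb => PySem.Int.bxor nb x)
      (g := fun (st : List (Int × Int) × PySem.Set Int) v =>
        if PySem.Set.contains st.2 v then st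
        else (st.1 ++ [(v, d + 1)], PySem.Set.add st.2 v))]
  generalize (bm.map (fun nb => PySem.Int.bxor nb x)) = xs
  induction xs generalizing N V with
  | nil => simp [pvGo]
  | cons v xs ih =>
    simp only [List.foldl_cons, pvGo]
    by_cases hcv : PySem.Set.contains V v
    · simp only [hcv, if_true]
      exact ih N V
    · simp only [hcv, Bool.false_eq_true, if_false]
      have h2 : (Q ++ N.map (fun v => (v, d + 1))) ++ [(v, d + 1)]
          = Q ++ (N ++ [v]).map (fun v => (v, d + 1)) := by
        rw [List.map_append, List.append_assoc]; rfl
      rw [h2]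
      exact ih (N ++ [v]) (PySem.Set.add V v)

-- A processes one whole layer: F are the depth-d entries, N the depth-(d+1) entries so far
theorem levelA (bm : List Int) (pat : Int) : ∀ (F : List Int) (f : Nat) (N : List Int) (V : PySem.Set Int) (d : Int),
    bfsLoopA bm pat (F.length + f) (F.map (fun v => (v, d)) ++ N.map (fun v => (v, d + 1))) V
      = if pat ∈ F then some d
        else bfsLoopA bm pat f ((pvLevel bm F (N, V)).1.map (fun v => (v, d + 1))) (pvLevel bm F (N, V)).2 := by
  intro F
  induction F with
  | nil =>
    intro f N V d
    simp [pvLevel]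
  | cons x F ih =>
    intro f N V d
    have hlen : (x :: F).length + f = (F.length + f) + 1 := by simp [List.length_cons]; omega
    rw [hlen]
    simp only [List.map_cons, List.cons_append]
    by_cases hx : x = pat
    · subst hx
      simp [bfsLoopA]
    · simp only [bfsLoopA, hx, if_false]
      rw [foldA_split]
      rw [ih f (pvGo (bm.map (fun nb => PySem.Int.bxor nb x)) (N, V)).1
            (pvGo (bm.map (fun nb => PySem.Int.bxor nb x)) (N, V)).2 d]
      have hlv : pvLevel bm (x :: F) (N, V)
          = pvLevel bm F (pvGo (bm.map (fun nb => PySem.Int.bxor nb x)) (N, V)) := rfl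
      rw [hlv]
      by_cases hp : pat ∈ F
      · rw [if_pos hp, if_pos (List.mem_cons_of_mem _ hp)]
      · rw [if_neg hp, if_neg (by
          simp only [List.mem_cons, not_or]
          exact ⟨fun h => hx (Eq.symm h), hp⟩)]

theorem monoA (bm : List Int) (pat : Int) : ∀ (f : Nat) (q : List (Int × Int)) (V : PySem.Set Int) (r : Int),
    bfsLoopA bm pat f q V = some r → bfsLoopA bm pat (f + 1) q V = some r := by
  intro f
  induction f with
  | zero => intro q V r h; simp [bfsLoopA] at h
  | succ f ih =>
    intro q V r h
    match q with
    | [] => simpa [bfsLoopA] using h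
    | (bmask, depth) :: q' =>
      simp only [bfsLoopA] at h ⊢
      by_cases hb : bmask = pat
      · simpa [hb] using h
      · simp only [hb, if_false] at h ⊢
        exact ih _ _ _ h

-- dedup of the layer list does not change the discovered-node set
theorem update_eq_self_of_subset {s : PySem.Set Int} {ys : List Int} (h : ∀ y ∈ ys, y ∈ s) :
    PySem.Set.update s ys = s := by
  rw [PySem.Set.update_eq_append_filter]
  have : List.filter (fun y => !s.contains y) (PySem.Set.ofList ys) = [] := by
    rw [List.filter_eq_nil_iff]
    intro y hy
    have : y ∈ s := h y ((PySem.Set.mem_ofList ys y).mp hy)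
    simp only [Bool.not_eq_true, ← Bool.not_eq_true']
    rw [Bool.not_not, PySem.Set.contains_iff]
    exact this
  rw [this, List.append_nil]

theorem ofList_filter_flatMap_dedup (g : Int → List Int) (p : Int → Bool) : ∀ (F : List Int),
    PySem.Set.ofList ((((PySem.Set.ofList F).flatMap g)).filter p)
      = PySem.Set.ofList ((F.flatMap g).filter p) := by
  intro F
  induction F using List.reverseRecOn with
  | nil => rfl
  | append_singleton F x ih =>
    rw [PySem.Set.ofList_append_singleton]
    have hflat : ∀ (L : List Int), ((L ++ [x]).flatMap g).filter p
        = (L.flatMap g).filter p ++ (g x).filter p := by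
      intro L; rw [List.flatMap_append, List.filter_append]; simp
    rw [hflat, PySem.Set.ofList_append]
    by_cases hx : x ∈ PySem.Set.ofList F
    · rw [PySem.Set.add_of_mem hx, ih]
      symm
      apply update_eq_self_of_subset
      intro y hy
      rw [List.mem_filter] at hy
      rw [PySem.Set.mem_ofList]
      rw [List.mem_filter]
      refine ⟨List.mem_flatMap.mpr ⟨x, ?_, hy.1⟩, hy.2⟩
      exact (PySem.Set.mem_ofList F x).mp hx
    · rw [PySem.Set.add_of_not_mem hx, hflat, PySem.Set.ofList_append, ih]


theorem sdiff_union_eq (s t u : Finset Int) : s \ (t ∪ u) = (s \ t) \ u := by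
  ext a; simp only [Finset.mem_sdiff, Finset.mem_union]; tauto

theorem cardStep (V nxt : List Int) (hnd : nxt.Nodup) (hS : ∀ v ∈ nxt, v ∈ pvS)
    (hV : ∀ v ∈ nxt, v ∉ V) :
    (pvS \ (V ++ nxt).toFinset).card + nxt.length = (pvS \ V.toFinset).card := by
  have hsub : nxt.toFinset ⊆ pvS \ V.toFinset := by
    intro a ha
    rw [List.mem_toFinset] at ha
    rw [Finset.mem_sdiff, List.mem_toFinset]
    exact ⟨hS a ha, hV a ha⟩
  have heq : pvS \ (V ++ nxt).toFinset = (pvS \ V.toFinset) \ nxt.toFinset := by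
    rw [List.toFinset_append, sdiff_union_eq]
  have hle : nxt.toFinset.card ≤ (pvS \ V.toFinset).card := Finset.card_le_card hsub
  rw [heq, Finset.card_sdiff, Finset.inter_eq_left.mpr hsub, List.toFinset_card_of_nodup hnd]
  rw [List.toFinset_card_of_nodup hnd] at hle
  omega

-- newly discovered nodes: distinct, unvisited, and inside pvS
theorem nxt_props (bm : List Int) (hbm : ∀ b ∈ bm, b ∈ pvS) (F V : List Int)
    (hF : ∀ x ∈ F, x ∈ pvS) (g : Int → List Int)
    (hg : g = fun x => bm.map (fun nb => PySem.Int.bxor nb x)) :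
    (PySem.Set.ofList ((F.flatMap g).filter (fun v => !PySem.Set.contains V v))).Nodup
    ∧ (∀ v ∈ PySem.Set.ofList ((F.flatMap g).filter (fun v => !PySem.Set.contains V v)), v ∈ pvS)
    ∧ (∀ v ∈ PySem.Set.ofList ((F.flatMap g).filter (fun v => !PySem.Set.contains V v)), v ∉ V) := by
  refine ⟨PySem.Set.nodup_ofList _, ?_, ?_⟩
  · intro v hv
    rw [PySem.Set.mem_ofList, List.mem_filter] at hv
    obtain ⟨x, hx, hvx⟩ := List.mem_flatMap.mp hv.1
    rw [hg] at hvx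
    obtain ⟨nb, hnb, rfl⟩ := List.mem_map.mp hvx
    exact bxor_mem_pvS (hbm nb hnb) (hF x hx)
  · intro v hv
    rw [PySem.Set.mem_ofList, List.mem_filter] at hv
    have := hv.2
    rw [Bool.not_eq_eq_eq_not, Bool.not_true, ← Bool.not_eq_true, PySem.Set.contains_iff] at this
    exact this

-- B's fuel is sufficient
theorem suffB (bm : List Int) (pat : Int) (hbm : ∀ b ∈ bm, b ∈ pvS) :
    ∀ (k : Nat) (F V : PySem.Set Int) (d : Int),
      (∀ x ∈ F, x ∈ pvS) → (pvS \ V.toFinset).card + 2 ≤ k →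
      (bfsLoopB bm pat k F V d).isSome := by
  intro k
  induction k using Nat.strong_induction_on with
  | _ k ihk =>
    intro F V d hF hcard
    match k, hcard with
    | k' + 1, hcard =>
      simp only [bfsLoopB]
      by_cases hFnil : F = []
      · simp [hFnil]
      · rw [if_neg hFnil]
        by_cases hp : pat ∈ F
        · simp [hp]
        · rw [if_neg hp]
          set g : Int → List Int := fun m => bm.map (fun b => PySem.Int.bxor m b) with hgdef
          have hg' : g = fun x => bm.map (fun nb => PySem.Int.bxor nb x) := by
            funext m
            exact List.map_congr_left (fun b _ => by rw [PySem.Int.bxor_comm])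
          obtain ⟨hnd, hS, hV⟩ := nxt_props bm hbm F V hF g hg'
          set nxt := PySem.Set.ofList ((F.flatMap g).filter (fun v => !PySem.Set.contains V v)) with hnxt
          have hunion : PySem.Set.union V nxt = V ++ nxt :=
            PySem.Set.update_eq_append_of_disjoint V nxt hnd hV
          have hcs := cardStep V nxt hnd hS hV
          rw [hunion]
          by_cases hnil : nxt = []
          · rw [hnil]
            have hk' : 1 ≤ k' := by omega
            match k', hk' with
            | k'' + 1, _ => simp [bfsLoopB]
          · have hlen : 1 ≤ nxt.length := List.length_pos_iff.mpr hnil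
            exact ihk k' (by omega) nxt (V ++ nxt) (d + 1) hS (by omega)

-- the simulation: whenever B's layer loop returns r, A's deque loop returns r
theorem bridge (bm : List Int) (pat : Int) (hbm : ∀ b ∈ bm, b ∈ pvS) :
    ∀ (fb : Nat) (Fa : List Int) (V : PySem.Set Int) (d : Int) (r : Int),
      (∀ x ∈ Fa, x ∈ pvS) →
      bfsLoopB bm pat fb (PySem.Set.ofList Fa) V d = some r →
      bfsLoopA bm pat (Fa.length + (pvS \ V.toFinset).card + fb) (Fa.map (fun v => (v, d))) V = some r := by
  intro fb
  induction fb with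
  | zero => intro Fa V d r _ h; simp [bfsLoopB] at h
  | succ fb ih =>
    intro Fa V d r hFa h
    simp only [bfsLoopB] at h
    by_cases hnil : PySem.Set.ofList Fa = []
    · have hFnil : Fa = [] := by
        cases Fa with
        | nil => rfl
        | cons a t =>
          exfalso
          have : a ∈ PySem.Set.ofList (a :: t) := (PySem.Set.mem_ofList _ _).mpr List.mem_cons_self
          rw [hnil] at this
          simp at this
      rw [if_pos hnil] at h
      subst hFnil
      have harith : ([] : List Int).length + (pvS \ V.toFinset).card + (fb + 1)
          = ((pvS \ V.toFinset).card + fb) + 1 := by simp; omega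
      rw [harith]
      simp only [List.map_nil, bfsLoopA]
      exact h
    · rw [if_neg hnil] at h
      by_cases hp : pat ∈ PySem.Set.ofList Fa
      · rw [if_pos hp] at h
        have hpFa : pat ∈ Fa := (PySem.Set.mem_ofList _ _).mp hp
        have harith : Fa.length + (pvS \ V.toFinset).card + (fb + 1)
            = Fa.length + ((pvS \ V.toFinset).card + (fb + 1)) := by omega
        rw [harith]
        have hlvl := levelA bm pat Fa ((pvS \ V.toFinset).card + (fb + 1)) [] V d
        simp only [List.map_nil, List.append_nil] at hlvl
        rw [hlvl, if_pos hpFa]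
        exact h
      · rw [if_neg hp] at h
        have hpFa : pat ∉ Fa := fun hc => hp ((PySem.Set.mem_ofList _ _).mpr hc)
        -- identify B's next frontier with A's newly discovered nodes C
        set g : Int → List Int := fun x => bm.map (fun nb => PySem.Int.bxor nb x) with hgdef
        set C := PySem.Set.ofList ((Fa.flatMap g).filter (fun v => !PySem.Set.contains V v)) with hC
        have hgcomm : (fun m => bm.map (fun b => PySem.Int.bxor m b)) = g := by
          funext m
          exact List.map_congr_left (fun b _ => by rw [PySem.Int.bxor_comm])
        have hnxtB : PySem.Set.ofList
            ((((PySem.Set.ofList Fa).flatMap (fun m => bm.map (fun b => PySem.Int.bxor m b)))).filter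
              (fun v => !PySem.Set.contains V v)) = C := by
          rw [hgcomm, ofList_filter_flatMap_dedup]
        rw [hnxtB] at h
        obtain ⟨hnd, hS, hVfresh⟩ := nxt_props bm hbm Fa V hFa g rfl
        have hunion : PySem.Set.union V C = V ++ C :=
          PySem.Set.update_eq_append_of_disjoint V C hnd hVfresh
        rw [hunion] at h
        have hofC : PySem.Set.ofList C = C := PySem.Set.ofList_eq_self_of_nodup C hnd
        have hih := ih C (V ++ C) (d + 1) r hS (by rw [hofC]; exact h)
        have hcs := cardStep V C hnd hS hVfresh
        -- A processes the whole layer Fa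
        have harith : Fa.length + (pvS \ V.toFinset).card + (fb + 1)
            = Fa.length + (((pvS \ V.toFinset).card + fb) + 1) := by omega
        rw [harith]
        have hlvl := levelA bm pat Fa (((pvS \ V.toFinset).card + fb) + 1) [] V d
        simp only [List.map_nil, List.append_nil] at hlvl
        rw [hlvl, if_neg hpFa]
        have hsplit := pvLevel_split bm Fa [] V
        simp only [List.append_nil, PySem.Set.update_nil_left] at hsplit
        rw [hsplit]
        have harith2 : C.length + (pvS \ (V ++ C).toFinset).card + fb
            = (pvS \ V.toFinset).card + fb := by omega
        rw [harith2] at hih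
        exact monoA bm pat ((pvS \ V.toFinset).card + fb) _ _ r hih

-- ===== VERDICT (by name: the statement is the Claim_ definition above) =====
theorem bfs_spec : Claim_equal_bfs := by
  unfold Claim_equal_bfs Spec_bfs
  intro bm pat hDom
  have hbm : ∀ b ∈ bm, b ∈ pvS := by
    unfold Dom_bfs at hDom
    rw [Bool.and_eq_true] at hDom
    intro b hb
    exact dom_mem_pvS (List.all_eq_true.mp hDom.1 b hb)
  have hF : ∀ x ∈ PySem.Set.ofList bm, x ∈ pvS := fun x hx => hbm x ((PySem.Set.mem_ofList _ _).mp hx)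
  have hcard0 : (pvS \ (PySem.Set.empty : PySem.Set Int).toFinset).card = 2 ^ 33 := by
    show (pvS \ ([] : List Int).toFinset).card = 2 ^ 33
    rw [List.toFinset_nil, Finset.sdiff_empty, pvS_card]
  have hs := suffB bm pat hbm (2 ^ 33 + 2) (PySem.Set.ofList bm) PySem.Set.empty 1 hF
    (by rw [hcard0])
  obtain ⟨r, hr⟩ := Option.isSome_iff_exists.mp hs
  have hb := bridge bm pat hbm (2 ^ 33 + 2) bm PySem.Set.empty 1 r hbm hr
  have hpow : (2 : Nat) ^ 34 = 2 ^ 33 + 2 ^ 33 := by norm_num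
  have harith : bm.length + (pvS \ (PySem.Set.empty : PySem.Set Int).toFinset).card + (2 ^ 33 + 2)
      = bm.length + 2 ^ 34 + 2 := by rw [hcard0]; omega
  rw [harith] at hb
  unfold bfs bfs_alt
  rw [hb, hr]
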